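-- pv_equiv track=rewrite | github.com/ragstoriches919/elements_of_programming_interview_qs | 6.10/6.10_my_try.py | sinusoidal_string
-- ===== SOURCE A (Python) =====
-- def sinusoidal_string(s):
--
--     top = ""
--     mid = ""
--     bottom = ""
--
--     for i in range(1, len(s), 4):
--         top += s[i]
--
--     for i in range(0, len(s), 2):
--         mid += s[i]
--
--     for i in range(3, len(s), 4):
--         bottom += s[i]
--
--     return top + mid + bottom
-- ===== SOURCE B (Python) =====
-- def sinusoidal_string(s):
--     top, mid, bottom = [], [], []
--     for i, c in enumerate(s):
--         if i % 2 == 0: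
--             mid.append(c)
--         elif i % 4 == 1:
--             top.append(c)
--         else:
--             bottom.append(c)
--     return "".join(top) + "".join(mid) + "".join(bottom)
-- ===== Notes on version B (the rewrite author's own statement) =====
-- stated objective: alternative
-- what changed: Replaces A's three separate strided passes over the string by a single enumerate pass that dispatches each character to one of three lists by its index residue mod 4/2, joined once at the end.
import Mathlib
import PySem

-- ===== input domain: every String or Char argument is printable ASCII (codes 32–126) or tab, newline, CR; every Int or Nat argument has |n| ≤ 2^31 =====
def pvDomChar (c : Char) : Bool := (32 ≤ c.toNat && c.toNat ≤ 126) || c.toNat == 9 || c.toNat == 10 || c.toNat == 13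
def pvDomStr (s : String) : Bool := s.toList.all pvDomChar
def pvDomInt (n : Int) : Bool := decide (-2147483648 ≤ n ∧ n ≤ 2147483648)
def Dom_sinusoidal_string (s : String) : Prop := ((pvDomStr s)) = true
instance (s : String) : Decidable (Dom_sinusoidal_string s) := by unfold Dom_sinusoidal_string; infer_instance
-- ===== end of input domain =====

-- B replaces A's three strided passes by a single pass dispatching each character by index residue; proved to return A's value on the stated domain.


-- ===== PORT A =====
-- Three strided loops, each appending s[i]; indices produced by pyRange are always
-- in range, so the IndexError branch (pyGet? = none, Option.toList = []) is never taken.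
def sinusoidal_string (s : String) : String :=
  let l := s.toList
  let n : Int := (l.length : Int)
  let top := (PySem.List.pyRange 1 n 4).foldl
    (fun acc i => acc ++ (PySem.List.pyGet? l i).toList) []
  let mid := (PySem.List.pyRange 0 n 2).foldl
    (fun acc i => acc ++ (PySem.List.pyGet? l i).toList) []
  let bottom := (PySem.List.pyRange 3 n 4).foldl
    (fun acc i => acc ++ (PySem.List.pyGet? l i).toList) []
  String.mk (top ++ mid ++ bottom)

-- ===== PORT B =====
-- Single pass over enumerate(s): each character goes to one of three accumulators
-- chosen by its index's residue; the three lists are joined once at the end.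
def sinusoidal_string_alt (s : String) : String :=
  let r := (PySem.List.enumerate s.toList 0).foldl
    (fun acc p =>
      if p.1 % 2 = 0 then (acc.1, acc.2.1 ++ [p.2], acc.2.2)
      else if p.1 % 4 = 1 then (acc.1 ++ [p.2], acc.2.1, acc.2.2)
      else (acc.1, acc.2.1, acc.2.2 ++ [p.2]))
    ([], [], [])
  String.mk (r.1 ++ r.2.1 ++ r.2.2)

-- ===== PRECONDITION & SPEC =====
def Spec_sinusoidal_string (s : String) (out : String) : Prop := out = sinusoidal_string_alt s
instance (s : String) (out : String) : Decidable (Spec_sinusoidal_string s out) := by unfold Spec_sinusoidal_string; infer_instance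

-- ===== CLAIM (what is proved, stated in full; the proofs are below) =====
def Claim_equal_sinusoidal_string : Prop := ∀ (s : String), Dom_sinusoidal_string s → Spec_sinusoidal_string s (sinusoidal_string s)

-- ===== LEMMAS AND PROOFS =====

-- Characters of l at indices a, a+st, a+2*st, … (a common characterization of both sides).
def pvPick : List Char → Nat → Nat → List Char
  | [], _, _ => []
  | c :: r, 0, st => c :: pvPick r (st - 1) st
  | _ :: r, a + 1, st => pvPick r a st

theorem pvRange_nil (a b s : Int) (hs : 0 < s) (h : b ≤ a) :
    PySem.List.pyRange a b s = [] := by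
  rw [PySem.List.pyRange_of_pos _ _ hs]
  simp [show ¬ a < b by omega]

theorem pvRange_shift (a b s : Int) (hs : 0 < s) :
    PySem.List.pyRange (a + 1) (b + 1) s = (PySem.List.pyRange a b s).map (· + 1) := by
  rw [PySem.List.pyRange_of_pos _ _ hs, PySem.List.pyRange_of_pos _ _ hs, List.map_map]
  have hc : (a + 1 < b + 1) ↔ (a < b) := by omega
  have he : b + 1 - (a + 1) + s - 1 = b - a + s - 1 := by ring
  simp only [he, hc]
  exact List.map_congr_left (fun k _ => by simp [Function.comp]; ring)

theorem pvRange_cons (a b s : Int) (hs : 0 < s) (h : a < b) :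
    PySem.List.pyRange a b s = a :: PySem.List.pyRange (a + s) b s := by
  rw [PySem.List.pyRange_of_pos _ _ hs, PySem.List.pyRange_of_pos _ _ hs]
  have hdiv : (b - a + s - 1) / s = (b - a - 1) / s + 1 := by
    have h1 := Int.add_mul_ediv_right (b - a - 1) 1 (show s ≠ 0 by omega)
    rw [one_mul] at h1
    rw [show b - a + s - 1 = b - a - 1 + s by ring, h1]
  have hkey : (if a < b then ((b - a + s - 1) / s).toNat else 0)
      = (if a + s < b then ((b - (a + s) + s - 1) / s).toNat else 0) + 1 := by
    rw [if_pos h, hdiv]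
    split_ifs with h2
    · have he2 : b - (a + s) + s - 1 = b - a - 1 := by ring
      rw [he2]
      have hnn : 0 ≤ (b - a - 1) / s := Int.ediv_nonneg (by omega) (by omega)
      omega
    · have hz : (b - a - 1) / s = 0 := Int.ediv_eq_zero_of_lt (by omega) (by omega)
      rw [hz]; decide
  rw [hkey, List.range_succ_eq_map, List.map_cons, List.map_map]
  congr 1
  · simp
  · exact List.map_congr_left (fun k _ => by simp [Function.comp]; push_cast; ring)

theorem pvGet_cons_succ (c : Char) (r : List Char) (i : Int) (hi : 0 ≤ i) :
    PySem.List.pyGet? (c :: r) (i + 1) = PySem.List.pyGet? r i := by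
  obtain ⟨k, rfl⟩ := Int.eq_ofNat_of_zero_le hi
  have h1 : (k : Int) + 1 = ((k + 1 : Nat) : Int) := by push_cast; ring
  rw [h1, PySem.List.pyGet?_natCast, PySem.List.pyGet?_natCast]
  simp

theorem pvFlatMap_congr {α β : Type} (f g : α → List β) (l : List α)
    (h : ∀ x ∈ l, f x = g x) : l.flatMap f = l.flatMap g := by
  induction l with
  | nil => simp
  | cons x xs ih =>
    simp only [List.flatMap_cons]
    rw [h x (by simp), ih (fun y hy => h y (by simp [hy]))]

theorem pvKeyA (l : List Char) (a st : Nat) (hst : 0 < st) :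
    (PySem.List.pyRange (a : Int) (l.length : Int) (st : Int)).flatMap
      (fun i => (PySem.List.pyGet? l i).toList) = pvPick l a st := by
  induction l generalizing a with
  | nil =>
    rw [pvRange_nil _ _ _ (by exact_mod_cast hst) (by simp)]
    simp [pvPick]
  | cons c r ih =>
    have hstep : (0 : Int) < (st : Int) := by exact_mod_cast hst
    have hlen : ((c :: r).length : Int) = (r.length : Int) + 1 := by simp
    cases a with
    | zero =>
      rw [pvRange_cons _ _ _ hstep (by simp)]
      simp only [List.flatMap_cons]
      have hhead : PySem.List.pyGet? (c :: r) ((0 : Nat) : Int) = some c := by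
        rw [PySem.List.pyGet?_natCast]; simp
      have h1 : ((0 : Nat) : Int) + (st : Int) = ((st - 1 : Nat) : Int) + 1 := by
        push_cast; omega
      rw [h1, hlen, pvRange_shift _ _ _ hstep, List.flatMap_map]
      have hcg : (PySem.List.pyRange ((st - 1 : Nat) : Int) (r.length : Int) (st : Int)).flatMap
            (fun i => (PySem.List.pyGet? (c :: r) (i + 1)).toList)
          = (PySem.List.pyRange ((st - 1 : Nat) : Int) (r.length : Int) (st : Int)).flatMap
            (fun i => (PySem.List.pyGet? r i).toList) := by
        apply pvFlatMap_congr
        intro x hx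
        have := (PySem.List.mem_pyRange_iff_of_pos hstep x).mp hx
        rw [pvGet_cons_succ _ _ _ (by omega)]
      simp only [Function.comp] at *
      rw [hhead]
      rw [hcg, ih (st - 1)]
      simp [pvPick]
    | succ a =>
      have h1 : ((a + 1 : Nat) : Int) = ((a : Nat) : Int) + 1 := by push_cast; ring
      rw [h1, hlen, pvRange_shift _ _ _ hstep, List.flatMap_map]
      have hcg : (PySem.List.pyRange ((a : Nat) : Int) (r.length : Int) (st : Int)).flatMap
            (fun i => (PySem.List.pyGet? (c :: r) (i + 1)).toList)
          = (PySem.List.pyRange ((a : Nat) : Int) (r.length : Int) (st : Int)).flatMap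
            (fun i => (PySem.List.pyGet? r i).toList) := by
        apply pvFlatMap_congr
        intro x hx
        have := (PySem.List.mem_pyRange_iff_of_pos hstep x).mp hx
        rw [pvGet_cons_succ _ _ _ (by omega)]
      simp only [Function.comp] at *
      rw [hcg, ih a]
      simp [pvPick]

theorem pvKeyB (l : List Char) (n : Nat) (t m b : List Char) :
    (PySem.List.enumerate l (n : Int)).foldl
      (fun acc p =>
        if p.1 % 2 = 0 then (acc.1, acc.2.1 ++ [p.2], acc.2.2)
        else if p.1 % 4 = 1 then (acc.1 ++ [p.2], acc.2.1, acc.2.2)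
        else (acc.1, acc.2.1, acc.2.2 ++ [p.2]))
      (t, m, b)
    = (t ++ pvPick l ((5 - n % 4) % 4) 4, m ++ pvPick l ((2 - n % 2) % 2) 2,
       b ++ pvPick l ((7 - n % 4) % 4) 4) := by
  induction l generalizing n t m b with
  | nil => simp [PySem.List.enumerate, pvPick]
  | cons c r ih =>
    rw [PySem.List.enumerate_cons]
    have h1 : (n : Int) + 1 = ((n + 1 : Nat) : Int) := by push_cast; ring
    have h4 : n % 4 = 0 ∨ n % 4 = 1 ∨ n % 4 = 2 ∨ n % 4 = 3 := by omega
    rcases h4 with h | h | h | h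
    · have h2 : ((n : Int) % 2 = 0) := by omega
      simp only [List.foldl_cons, if_pos h2, h1, ih]
      have ha : (n + 1) % 4 = 1 := by omega
      have hb : n % 2 = 0 := by omega
      have hb1 : (n + 1) % 2 = 1 := by omega
      simp [h, ha, hb, hb1, pvPick]
    · have h2 : ¬ ((n : Int) % 2 = 0) := by omega
      have h3 : ((n : Int) % 4 = 1) := by omega
      simp only [List.foldl_cons, if_neg h2, if_pos h3, h1, ih]
      have ha : (n + 1) % 4 = 2 := by omega
      have hb : n % 2 = 1 := by omega
      have hb1 : (n + 1) % 2 = 0 := by omega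
      simp [h, ha, hb, hb1, pvPick]
    · have h2 : ((n : Int) % 2 = 0) := by omega
      simp only [List.foldl_cons, if_pos h2, h1, ih]
      have ha : (n + 1) % 4 = 3 := by omega
      have hb : n % 2 = 0 := by omega
      have hb1 : (n + 1) % 2 = 1 := by omega
      simp [h, ha, hb, hb1, pvPick]
    · have h2 : ¬ ((n : Int) % 2 = 0) := by omega
      have h3 : ¬ ((n : Int) % 4 = 1) := by omega
      simp only [List.foldl_cons, if_neg h2, if_neg h3, h1, ih]
      have ha : (n + 1) % 4 = 0 := by omega
      have hb : n % 2 = 1 := by omega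
      have hb1 : (n + 1) % 2 = 0 := by omega
      simp [h, ha, hb, hb1, pvPick]

-- ===== VERDICT (by name: the statement is the Claim_ definition above) =====
theorem sinusoidal_string_spec : Claim_equal_sinusoidal_string := by
  intro s _
  unfold Spec_sinusoidal_string sinusoidal_string sinusoidal_string_alt
  simp only [PySem.List.foldl_append_eq_flatMap, List.nil_append]
  have hA1 := pvKeyA s.toList 1 4 (by omega)
  have hA2 := pvKeyA s.toList 0 2 (by omega)
  have hA3 := pvKeyA s.toList 3 4 (by omega)
  have hB := pvKeyB s.toList 0 [] [] []
  simp only [Nat.cast_ofNat, Nat.cast_one, Nat.cast_zero] at hA1 hA2 hA3 hB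
  rw [hA1, hA2, hA3, hB]
  simp
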